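-- pv_equiv track=rewrite | github.com/meezlung/git-test | lab11/lab11b_bruteforce.py | lattice_points_triangle_int
-- ===== SOURCE A (Python) =====
-- Point = tuple[int,int]
--
-- Polygon = list[Point]
--
-- def extended_gcd(a: int, b: int):
--     if b == 0:
--         return (a, 1, 0)
--     else:
--         g, x1, y1 = extended_gcd(b, a % b)
--         x = y1
--         y = x1 - (a // b) * y1
--         return (g, x, y)
--
-- def area2(poly: Polygon) -> int:
--     A=0
--     n=len(poly)
--     for i in range(n):
--         x1,y1=poly[i]
--         x2,y2=poly[(i+1)%n]
--         A+=x1*y2-x2*y1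
--     return abs(A)
--
-- def lattice_points_on_segment(p: Point, q: Point) -> set[Point]:
--     dx = q[0] - p[0]
--     dy = q[1] - p[1]
--     g = extended_gcd(abs(dx), abs(dy))[0]
--     pts = set()
--     if g == 0:
--         pts.add(p)
--     else:
--         step = (dx//g, dy//g)
--         for k in range(g+1):
--             pts.add((p[0] + k*step[0], p[1] + k*step[1]))
--     return pts
--
-- def lattice_points_triangle_int(p1: Point, p2: Point, p3: Point) -> set[Point]:
--     # if degenerate (collinear), union points on edges
--     if area2([p1,p2,p3]) == 0:
--         pts = set()
--         pts |= lattice_points_on_segment(p1,p2)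
--         pts |= lattice_points_on_segment(p2,p3)
--         pts |= lattice_points_on_segment(p3,p1)
--         return pts
--     # else, generate interior + boundary via Pick's theorem enumeration
--     # bounding box
--     xs = [p1[0], p2[0], p3[0]]
--     ys = [p1[1], p2[1], p3[1]]
--     xmin, xmax = min(xs), max(xs)
--     ymin, ymax = min(ys), max(ys)
--     pts = set()
--     # barycentric or area test
--     def orient_int(a,b,c):
--         return (b[0]-a[0])*(c[1]-a[1]) - (b[1]-a[1])*(c[0]-a[0])
--     for x in range(xmin, xmax+1):
--         for y in range(ymin, ymax+1):
--             pt = (x,y)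
--             # check inside or on boundary
--             w1 = orient_int(p1,p2,pt)
--             w2 = orient_int(p2,p3,pt)
--             w3 = orient_int(p3,p1,pt)
--             if (w1>=0 and w2>=0 and w3>=0) or (w1<=0 and w2<=0 and w3<=0):
--                 pts.add(pt)
--     return pts
-- ===== SOURCE B (Python) =====
-- Point = tuple[int, int]
--
-- def _gcd(a: int, b: int) -> int:
--     while b:
--         a, b = b, a % b
--     return a
--
-- def lattice_points_triangle_int(p1: Point, p2: Point, p3: Point) -> set[Point]:
--     (x1, y1), (x2, y2), (x3, y3) = p1, p2, p3
--     S = (x2 - x1) * (y3 - y1) - (y2 - y1) * (x3 - x1)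
--     pts = set()
--     if S == 0:
--         # collinear: walk the lattice points of each edge directly
--         for (ax, ay), (bx, by) in ((p1, p2), (p2, p3), (p3, p1)):
--             dx, dy = bx - ax, by - ay
--             g = _gcd(abs(dx), abs(dy))
--             if g == 0:
--                 pts.add((ax, ay))
--             else:
--                 sx, sy = dx // g, dy // g
--                 for k in range(g + 1):
--                     pts.add((ax + k * sx, ay + k * sy))
--         return pts
--     if S < 0:  # make the vertex order counter-clockwise
--         x2, y2, x3, y3 = x3, y3, x2, y2
--     xmin, xmax = min(x1, x2, x3), max(x1, x2, x3)
--     ymin, ymax = min(y1, y2, y3), max(y1, y2, y3)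
--     # scanline: per column x, clamp [lo, hi] by each edge's half-plane
--     for x in range(xmin, xmax + 1):
--         ok, lo, hi = True, ymin, ymax
--         for ax, ay, bx, by in ((x1, y1, x2, y2), (x2, y2, x3, y3), (x3, y3, x1, y1)):
--             b = bx - ax
--             c = (by - ay) * (x - ax) + ay * b
--             if b > 0:
--                 q = -((-c) // b)
--                 if q > lo:
--                     lo = q
--             elif b < 0:
--                 q = c // b
--                 if q < hi:
--                     hi = q
--             elif c > 0:
--                 ok = False
--         if ok:
--             for y in range(lo, hi + 1):
--                 pts.add((x, y))
--     return pts
-- ===== Notes on version B (the rewrite author's own statement) =====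
-- stated objective: alternative
-- what changed: A tests every lattice point of the bounding box with three orientation products; B is a scanline that, per column x, clamps an integer y-interval [lo,hi] with one ceil/floor division per edge and emits exactly the column's points (degenerate collinear input is still handled by walking the three edges).
import Mathlib
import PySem

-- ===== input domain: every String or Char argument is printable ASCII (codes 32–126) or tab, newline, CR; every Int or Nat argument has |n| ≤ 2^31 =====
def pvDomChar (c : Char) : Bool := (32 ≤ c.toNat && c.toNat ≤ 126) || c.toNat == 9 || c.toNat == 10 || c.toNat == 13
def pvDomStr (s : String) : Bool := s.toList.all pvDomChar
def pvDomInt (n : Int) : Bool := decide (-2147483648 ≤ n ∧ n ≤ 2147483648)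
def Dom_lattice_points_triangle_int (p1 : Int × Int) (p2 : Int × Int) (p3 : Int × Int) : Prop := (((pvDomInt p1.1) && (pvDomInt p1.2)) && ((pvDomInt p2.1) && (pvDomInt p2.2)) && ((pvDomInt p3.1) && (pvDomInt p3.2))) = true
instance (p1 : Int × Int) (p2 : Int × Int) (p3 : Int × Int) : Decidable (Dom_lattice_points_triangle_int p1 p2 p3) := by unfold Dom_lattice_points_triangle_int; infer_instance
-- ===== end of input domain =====

-- B replaces A's per-cell triple orientation test over the whole bounding box by a per-column
-- integer y-interval (scanline) that emits each column's points directly.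

-- ===== PORT A =====
lemma pv_mod_natAbs_lt (a b : Int) (h : b ≠ 0) : (PySem.Int.mod a b).natAbs < b.natAbs := by
  rcases h.lt_or_gt with hb | hb
  · have h1 := PySem.Int.mod_neg_bounds a hb; omega
  · have h1 := PySem.Int.mod_nonneg a hb; have h2 := PySem.Int.mod_lt a hb; omega

def extended_gcd (a b : Int) : Int × Int × Int :=
  if _h : b = 0 then (a, 1, 0)
  else
    let r := extended_gcd b (PySem.Int.mod a b)
    (r.1, r.2.2, r.2.1 - (PySem.Int.floordiv a b) * r.2.2)
termination_by b.natAbs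
decreasing_by exact pv_mod_natAbs_lt a b _h

def area2 (poly : List (Int × Int)) : Int :=
  let n : Int := poly.length
  let A := (PySem.List.pyRange 0 n).foldl (fun A i =>
    let q1 := PySem.List.pyGetD poly i (0, 0)
    let q2 := PySem.List.pyGetD poly (PySem.Int.mod (i + 1) n) (0, 0)
    A + (q1.1 * q2.2 - q2.1 * q1.2)) 0
  |A|

def lattice_points_on_segment (p q : Int × Int) : PySem.Set (Int × Int) :=
  let dx := q.1 - p.1
  let dy := q.2 - p.2
  let g := (extended_gcd |dx| |dy|).1
  let pts : PySem.Set (Int × Int) := PySem.Set.empty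
  if g = 0 then PySem.Set.add pts p
  else
    let step := (PySem.Int.floordiv dx g, PySem.Int.floordiv dy g)
    (PySem.List.pyRange 0 (g + 1)).foldl
      (fun pts k => PySem.Set.add pts (p.1 + k * step.1, p.2 + k * step.2)) pts

def orient_int (a b c : Int × Int) : Int :=
  (b.1 - a.1) * (c.2 - a.2) - (b.2 - a.2) * (c.1 - a.1)

def lattice_points_triangle_int (p1 : Int × Int) (p2 : Int × Int) (p3 : Int × Int) : List (Int × Int) :=
  if area2 [p1, p2, p3] = 0 then
    let pts : PySem.Set (Int × Int) := PySem.Set.empty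
    let pts := PySem.Set.union pts (lattice_points_on_segment p1 p2)
    let pts := PySem.Set.union pts (lattice_points_on_segment p2 p3)
    let pts := PySem.Set.union pts (lattice_points_on_segment p3 p1)
    pts
  else
    let xmin := min p1.1 (min p2.1 p3.1)
    let xmax := max p1.1 (max p2.1 p3.1)
    let ymin := min p1.2 (min p2.2 p3.2)
    let ymax := max p1.2 (max p2.2 p3.2)
    (PySem.List.pyRange xmin (xmax + 1)).foldl (fun pts x =>
      (PySem.List.pyRange ymin (ymax + 1)).foldl (fun pts y =>
        let w1 := orient_int p1 p2 (x, y)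
        let w2 := orient_int p2 p3 (x, y)
        let w3 := orient_int p3 p1 (x, y)
        if (w1 ≥ 0 ∧ w2 ≥ 0 ∧ w3 ≥ 0) ∨ (w1 ≤ 0 ∧ w2 ≤ 0 ∧ w3 ≤ 0) then
          PySem.Set.add pts (x, y)
        else pts) pts) PySem.Set.empty

-- ===== PORT B =====
def gcdLoop (a b : Int) : Int :=
  if _h : b = 0 then a else gcdLoop b (PySem.Int.mod a b)
termination_by b.natAbs
decreasing_by exact pv_mod_natAbs_lt a b _h

def segWalk (pts : PySem.Set (Int × Int)) (a b : Int × Int) : PySem.Set (Int × Int) :=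
  let dx := b.1 - a.1
  let dy := b.2 - a.2
  let g := gcdLoop |dx| |dy|
  if g = 0 then PySem.Set.add pts a
  else
    let sx := PySem.Int.floordiv dx g
    let sy := PySem.Int.floordiv dy g
    (PySem.List.pyRange 0 (g + 1)).foldl
      (fun pts k => PySem.Set.add pts (a.1 + k * sx, a.2 + k * sy)) pts

def clampEdge (x : Int) (st : Bool × Int × Int) (e : Int × Int × Int × Int) : Bool × Int × Int :=
  let (ok, lo, hi) := st
  let (ax, ay, bx, by_) := e
  let b := bx - ax
  let c := (by_ - ay) * (x - ax) + ay * b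
  if b > 0 then
    let q := -(PySem.Int.floordiv (-c) b)
    if q > lo then (ok, q, hi) else (ok, lo, hi)
  else if b < 0 then
    let q := PySem.Int.floordiv c b
    if q < hi then (ok, lo, q) else (ok, lo, hi)
  else if c > 0 then (false, lo, hi)
  else (ok, lo, hi)

def lattice_points_triangle_int_alt (p1 : Int × Int) (p2 : Int × Int) (p3 : Int × Int) : List (Int × Int) :=
  let S := (p2.1 - p1.1) * (p3.2 - p1.2) - (p2.2 - p1.2) * (p3.1 - p1.1)
  if S = 0 then
    [(p1, p2), (p2, p3), (p3, p1)].foldl (fun pts e => segWalk pts e.1 e.2) PySem.Set.empty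
  else
    let x1 := p1.1; let y1 := p1.2
    let (x2, y2, x3, y3) :=
      if S < 0 then (p3.1, p3.2, p2.1, p2.2) else (p2.1, p2.2, p3.1, p3.2)
    let xmin := min x1 (min x2 x3)
    let xmax := max x1 (max x2 x3)
    let ymin := min y1 (min y2 y3)
    let ymax := max y1 (max y2 y3)
    (PySem.List.pyRange xmin (xmax + 1)).foldl (fun pts x =>
      let st := [(x1, y1, x2, y2), (x2, y2, x3, y3), (x3, y3, x1, y1)].foldl (clampEdge x)
        (true, ymin, ymax)
      if st.1 then
        (PySem.List.pyRange st.2.1 (st.2.2 + 1)).foldl (fun pts y => PySem.Set.add pts (x, y)) pts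
      else pts) PySem.Set.empty

-- ===== PRECONDITION & SPEC =====
def Spec_lattice_points_triangle_int (p1 : Int × Int) (p2 : Int × Int) (p3 : Int × Int) (out : List (Int × Int)) : Prop := out = lattice_points_triangle_int_alt p1 p2 p3
instance (p1 : Int × Int) (p2 : Int × Int) (p3 : Int × Int) (out : List (Int × Int)) : Decidable (Spec_lattice_points_triangle_int p1 p2 p3 out) := by unfold Spec_lattice_points_triangle_int; infer_instance

-- ===== CLAIM (what is proved, stated in full; the proofs are below) =====
def Claim_equal_lattice_points_triangle_int : Prop := ∀ (p1 : Int × Int) (p2 : Int × Int) (p3 : Int × Int), Dom_lattice_points_triangle_int p1 p2 p3 → Spec_lattice_points_triangle_int p1 p2 p3 (lattice_points_triangle_int p1 p2 p3)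

-- ===== LEMMAS AND PROOFS =====

-- the two gcd helpers agree in their first component
lemma extended_gcd_fst (a b : Int) : (extended_gcd a b).1 = gcdLoop a b := by
  unfold extended_gcd gcdLoop
  split
  · rfl
  · exact extended_gcd_fst b (PySem.Int.mod a b)
termination_by b.natAbs
decreasing_by exact pv_mod_natAbs_lt a b (by assumption)

-- A's "union a fresh segment set into pts" is B's "walk the segment adding into pts"
lemma union_seg_eq_segWalk (pts : PySem.Set (Int × Int)) (a b : Int × Int) :
    PySem.Set.union pts (lattice_points_on_segment a b) = segWalk pts a b := by
  simp only [lattice_points_on_segment, segWalk, extended_gcd_fst]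
  by_cases hg : gcdLoop |b.1 - a.1| |b.2 - a.2| = 0
  · rw [if_pos hg, if_pos hg]
    show PySem.Set.update pts (PySem.Set.add PySem.Set.empty a) = _
    rw [PySem.Set.add_of_not_mem (by simp [PySem.Set.empty])]
    show PySem.Set.update pts ([] ++ [a]) = _
    rw [List.nil_append, PySem.Set.update_cons, PySem.Set.update_nil]
  · rw [if_neg hg, if_neg hg]
    rw [← PySem.Set.update_map_eq_foldl_add, ← PySem.Set.update_map_eq_foldl_add]
    show PySem.Set.update pts (PySem.Set.update PySem.Set.empty _) = _
    simp only [PySem.Set.empty]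
    rw [PySem.Set.update_nil_left]
    rw [PySem.Set.update_eq_append_filter, PySem.Set.update_eq_append_filter,
      PySem.Set.ofList_ofList]

-- area2 of the triangle is the absolute orientation
lemma area2_tri (p1 p2 p3 : Int × Int) : area2 [p1, p2, p3] = |orient_int p1 p2 p3| := by
  have h3 : PySem.List.pyRange (0 : Int) (((3 : Nat)) : Int) = [0, 1, 2] := by decide
  have m1 : PySem.Int.mod 1 3 = 1 := by decide
  have m2 : PySem.Int.mod 2 3 = 2 := by decide
  have m3 : PySem.Int.mod 3 3 = 0 := by decide
  simp only [area2, List.length_cons, List.length_nil, h3, List.foldl_cons, List.foldl_nil]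
  norm_num [m1, m2, m3, PySem.List.pyGetD_ofNat', List.getD]
  congr 1
  simp only [orient_int]; ring

-- one clampEdge step conjoins exactly its edge's half-plane constraint
lemma clampEdge_iff (x y : Int) (st : Bool × Int × Int) (ax ay bx by_ : Int) :
    ((clampEdge x st (ax, ay, bx, by_)).1 = true ∧
      (clampEdge x st (ax, ay, bx, by_)).2.1 ≤ y ∧ y ≤ (clampEdge x st (ax, ay, bx, by_)).2.2)
    ↔ ((st.1 = true ∧ st.2.1 ≤ y ∧ y ≤ st.2.2) ∧ 0 ≤ orient_int (ax, ay) (bx, by_) (x, y)) := by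
  obtain ⟨ok, lo, hi⟩ := st
  have hor : orient_int (ax, ay) (bx, by_) (x, y)
      = y * (bx - ax) - ((by_ - ay) * (x - ax) + ay * (bx - ax)) := by
    simp only [orient_int]; ring
  rw [hor]
  simp only [clampEdge]
  set b := bx - ax with hb
  set c := (by_ - ay) * (x - ax) + ay * b with hc
  split_ifs with h1 h2 h3 h4 h5 <;> dsimp only
  · have key : -(PySem.Int.floordiv (-c) b) ≤ y ↔ 0 ≤ y * b - c := by
      rw [neg_le, PySem.Int.le_floordiv_iff_mul_le h1]
      constructor <;> intro <;> nlinarith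
    constructor
    · rintro ⟨hok, hq, hy⟩; exact ⟨⟨hok, by omega, hy⟩, key.mp hq⟩
    · rintro ⟨⟨hok, hlo, hy⟩, hcns⟩; exact ⟨hok, key.mpr hcns, hy⟩
  · have key : -(PySem.Int.floordiv (-c) b) ≤ y ↔ 0 ≤ y * b - c := by
      rw [neg_le, PySem.Int.le_floordiv_iff_mul_le h1]
      constructor <;> intro <;> nlinarith
    constructor
    · rintro ⟨hok, hlo, hy⟩; exact ⟨⟨hok, hlo, hy⟩, key.mp (by omega)⟩
    · rintro ⟨⟨hok, hlo, hy⟩, hcns⟩; exact ⟨hok, hlo, hy⟩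
  · have hfd : PySem.Int.floordiv c b = PySem.Int.floordiv (-c) (-b) := by
      rw [← PySem.Int.floordiv_neg_neg (-c) (-b), neg_neg, neg_neg]
    have key : y ≤ PySem.Int.floordiv c b ↔ 0 ≤ y * b - c := by
      rw [hfd, PySem.Int.le_floordiv_iff_mul_le (by omega : (0 : Int) < -b)]
      constructor <;> intro <;> nlinarith
    constructor
    · rintro ⟨hok, hlo, hy⟩; exact ⟨⟨hok, hlo, by omega⟩, key.mp hy⟩
    · rintro ⟨⟨hok, hlo, hy⟩, hcns⟩; exact ⟨hok, hlo, key.mpr hcns⟩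
  · have hfd : PySem.Int.floordiv c b = PySem.Int.floordiv (-c) (-b) := by
      rw [← PySem.Int.floordiv_neg_neg (-c) (-b), neg_neg, neg_neg]
    have key : y ≤ PySem.Int.floordiv c b ↔ 0 ≤ y * b - c := by
      rw [hfd, PySem.Int.le_floordiv_iff_mul_le (by omega : (0 : Int) < -b)]
      constructor <;> intro <;> nlinarith
    constructor
    · rintro ⟨hok, hlo, hy⟩; exact ⟨⟨hok, hlo, hy⟩, key.mp (by omega)⟩
    · rintro ⟨⟨hok, hlo, hy⟩, hcns⟩; exact ⟨hok, hlo, hy⟩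
  · have hb0 : b = 0 := by omega
    simp [hb0]; omega
  · have hb0 : b = 0 := by omega
    constructor
    · rintro ⟨hok, hlo, hy⟩; exact ⟨⟨hok, hlo, hy⟩, by rw [hb0]; omega⟩
    · rintro ⟨⟨hok, hlo, hy⟩, _⟩; exact ⟨hok, hlo, hy⟩

lemma clampEdge_mono (x : Int) (st : Bool × Int × Int) (e : Int × Int × Int × Int) :
    st.2.1 ≤ (clampEdge x st e).2.1 ∧ (clampEdge x st e).2.2 ≤ st.2.2 := by
  obtain ⟨ok, lo, hi⟩ := st
  obtain ⟨ax, ay, bx, by_⟩ := e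
  simp only [clampEdge]
  split_ifs <;> dsimp only <;> omega

-- a filter of consecutive integers by an interval predicate is that interval
lemma filter_pyRange_interval (p : Int → Prop) [DecidablePred p] (a b l h : Int)
    (hal : a ≤ l) (hhb : h ≤ b)
    (hp : ∀ y, a ≤ y → y < b → (p y ↔ (l ≤ y ∧ y < h))) :
    (PySem.List.pyRange a b).filter (fun y => decide (p y)) = PySem.List.pyRange l h := by
  have hanti : ∀ (u v : Int), u ∈ (PySem.List.pyRange a b).filter (fun y => decide (p y)) →
      v ∈ PySem.List.pyRange l h → u < v → v < u → u = v := fun u v _ _ h1 h2 => absurd h2 (asymm h1)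
  refine List.Perm.eq_of_pairwise hanti ?_ ?_ ?_
  · exact (PySem.List.pairwise_lt_pyRange_one a b).sublist List.filter_sublist
  · exact PySem.List.pairwise_lt_pyRange_one l h
  · rw [List.perm_ext_iff_of_nodup
      ((PySem.List.nodup_pyRange_one a b).sublist List.filter_sublist)
      (PySem.List.nodup_pyRange_one l h)]
    intro y
    simp only [List.mem_filter, PySem.List.mem_pyRange_one, decide_eq_true_eq]
    constructor
    · rintro ⟨⟨h1, h2⟩, h3⟩; exact (hp y h1 h2).mp h3
    · rintro ⟨h1, h2⟩
      have := (hp y (by omega) (by omega)).mpr ⟨h1, h2⟩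
      exact ⟨⟨by omega, by omega⟩, this⟩

-- for a CCW triple the sign test degenerates to the half-plane conjunction
lemma inside_iff_pos (p1 p2 p3 : Int × Int) (x y : Int) (hS : 0 < orient_int p1 p2 p3) :
    ((orient_int p1 p2 (x, y) ≥ 0 ∧ orient_int p2 p3 (x, y) ≥ 0 ∧ orient_int p3 p1 (x, y) ≥ 0) ∨
     (orient_int p1 p2 (x, y) ≤ 0 ∧ orient_int p2 p3 (x, y) ≤ 0 ∧ orient_int p3 p1 (x, y) ≤ 0))
    ↔ (0 ≤ orient_int p1 p2 (x, y) ∧ 0 ≤ orient_int p2 p3 (x, y) ∧ 0 ≤ orient_int p3 p1 (x, y)) := by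
  have hsum : orient_int p1 p2 (x, y) + orient_int p2 p3 (x, y) + orient_int p3 p1 (x, y)
      = orient_int p1 p2 p3 := by simp only [orient_int]; ring
  constructor
  · rintro (⟨h1, h2, h3⟩ | ⟨h1, h2, h3⟩)
    · exact ⟨h1, h2, h3⟩
    · exact absurd hS (by omega)
  · intro h; exact Or.inl ⟨h.1, h.2.1, h.2.2⟩

-- A's sign test is invariant under swapping the last two vertices
lemma pred_swap (p1 p2 p3 : Int × Int) (x y : Int) :
    (((orient_int p1 p2 (x, y) ≥ 0 ∧ orient_int p2 p3 (x, y) ≥ 0 ∧ orient_int p3 p1 (x, y) ≥ 0) ∨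
      (orient_int p1 p2 (x, y) ≤ 0 ∧ orient_int p2 p3 (x, y) ≤ 0 ∧ orient_int p3 p1 (x, y) ≤ 0)))
    ↔ (((orient_int p1 p3 (x, y) ≥ 0 ∧ orient_int p3 p2 (x, y) ≥ 0 ∧ orient_int p2 p1 (x, y) ≥ 0) ∨
      (orient_int p1 p3 (x, y) ≤ 0 ∧ orient_int p3 p2 (x, y) ≤ 0 ∧ orient_int p2 p1 (x, y) ≤ 0))) := by
  have e1 : orient_int p1 p3 (x, y) = -orient_int p3 p1 (x, y) := by simp only [orient_int]; ring
  have e2 : orient_int p3 p2 (x, y) = -orient_int p2 p3 (x, y) := by simp only [orient_int]; ring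
  have e3 : orient_int p2 p1 (x, y) = -orient_int p1 p2 (x, y) := by simp only [orient_int]; ring
  rw [e1, e2, e3]
  generalize orient_int p1 p2 (x, y) = w1
  generalize orient_int p2 p3 (x, y) = w2
  generalize orient_int p3 p1 (x, y) = w3
  omega

-- one column: A's filtered y-scan equals B's clamped interval emission (CCW triple)
lemma column_eq (q1 q2 q3 : Int × Int) (hS : 0 < orient_int q1 q2 q3)
    (ymin ymax x : Int) (pts : PySem.Set (Int × Int)) :
    (PySem.List.pyRange ymin (ymax + 1)).foldl (fun pts y =>
        if (orient_int q1 q2 (x, y) ≥ 0 ∧ orient_int q2 q3 (x, y) ≥ 0 ∧ orient_int q3 q1 (x, y) ≥ 0) ∨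
           (orient_int q1 q2 (x, y) ≤ 0 ∧ orient_int q2 q3 (x, y) ≤ 0 ∧ orient_int q3 q1 (x, y) ≤ 0)
        then PySem.Set.add pts (x, y) else pts) pts
    = (let st := [(q1.1, q1.2, q2.1, q2.2), (q2.1, q2.2, q3.1, q3.2), (q3.1, q3.2, q1.1, q1.2)].foldl
          (clampEdge x) (true, ymin, ymax)
       if st.1 then
         (PySem.List.pyRange st.2.1 (st.2.2 + 1)).foldl (fun pts y => PySem.Set.add pts (x, y)) pts
       else pts) := by
  simp only [List.foldl_cons, List.foldl_nil]
  set st1 := clampEdge x (true, ymin, ymax) (q1.1, q1.2, q2.1, q2.2) with hst1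
  set st2 := clampEdge x st1 (q2.1, q2.2, q3.1, q3.2) with hst2
  set st3 := clampEdge x st2 (q3.1, q3.2, q1.1, q1.2) with hst3
  have hiff : ∀ y : Int, (st3.1 = true ∧ st3.2.1 ≤ y ∧ y ≤ st3.2.2)
      ↔ ((ymin ≤ y ∧ y ≤ ymax) ∧ 0 ≤ orient_int q1 q2 (x, y) ∧ 0 ≤ orient_int q2 q3 (x, y) ∧
          0 ≤ orient_int q3 q1 (x, y)) := by
    intro y
    rw [hst3, clampEdge_iff, hst2, clampEdge_iff, hst1, clampEdge_iff]
    have hq12 : orient_int (q1.1, q1.2) (q2.1, q2.2) (x, y) = orient_int q1 q2 (x, y) := rfl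
    have hq23 : orient_int (q2.1, q2.2) (q3.1, q3.2) (x, y) = orient_int q2 q3 (x, y) := rfl
    have hq31 : orient_int (q3.1, q3.2) (q1.1, q1.2) (x, y) = orient_int q3 q1 (x, y) := rfl
    rw [hq12, hq23, hq31]
    dsimp only
    tauto
  have hmono : ymin ≤ st3.2.1 ∧ st3.2.2 ≤ ymax := by
    have h1 := clampEdge_mono x (true, ymin, ymax) (q1.1, q1.2, q2.1, q2.2)
    have h2 := clampEdge_mono x st1 (q2.1, q2.2, q3.1, q3.2)
    have h3 := clampEdge_mono x st2 (q3.1, q3.2, q1.1, q1.2)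
    rw [← hst1] at h1; rw [← hst2] at h2; rw [← hst3] at h3
    dsimp only at h1
    exact ⟨by omega, by omega⟩
  rw [PySem.List.foldl_ite_eq_foldl_filter
    (p := fun y => (orient_int q1 q2 (x, y) ≥ 0 ∧ orient_int q2 q3 (x, y) ≥ 0 ∧ orient_int q3 q1 (x, y) ≥ 0) ∨
           (orient_int q1 q2 (x, y) ≤ 0 ∧ orient_int q2 q3 (x, y) ≤ 0 ∧ orient_int q3 q1 (x, y) ≤ 0))
    (f := fun pts y => PySem.Set.add pts (x, y))]
  by_cases hok : st3.1 = true
  · rw [if_pos hok]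
    rw [filter_pyRange_interval _ ymin (ymax + 1) st3.2.1 (st3.2.2 + 1) hmono.1 (by omega)]
    intro y hy1 hy2
    rw [inside_iff_pos q1 q2 q3 x y hS]
    constructor
    · intro hin
      have := (hiff y).mpr ⟨⟨hy1, by omega⟩, hin⟩
      exact ⟨this.2.1, by omega⟩
    · intro hb
      have := (hiff y).mp ⟨hok, hb.1, by omega⟩
      exact this.2
  · rw [if_neg hok]
    have hnil : (PySem.List.pyRange ymin (ymax + 1)).filter (fun y =>
        decide ((orient_int q1 q2 (x, y) ≥ 0 ∧ orient_int q2 q3 (x, y) ≥ 0 ∧ orient_int q3 q1 (x, y) ≥ 0) ∨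
           (orient_int q1 q2 (x, y) ≤ 0 ∧ orient_int q2 q3 (x, y) ≤ 0 ∧ orient_int q3 q1 (x, y) ≤ 0))) = [] := by
      rw [List.filter_eq_nil_iff]
      intro y hy
      rw [PySem.List.mem_pyRange_one] at hy
      simp only [decide_eq_true_eq]
      intro hin
      rw [inside_iff_pos q1 q2 q3 x y hS] at hin
      have := (hiff y).mpr ⟨⟨hy.1, by omega⟩, hin⟩
      exact hok this.1
    rw [hnil, List.foldl_nil]

-- ===== VERDICT (by name: the statement is the Claim_ definition above) =====
theorem lattice_points_triangle_int_spec : Claim_equal_lattice_points_triangle_int := by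
  intro p1 p2 p3 _
  unfold Spec_lattice_points_triangle_int
  unfold lattice_points_triangle_int lattice_points_triangle_int_alt
  have hSo : (p2.1 - p1.1) * (p3.2 - p1.2) - (p2.2 - p1.2) * (p3.1 - p1.1)
      = orient_int p1 p2 p3 := by simp only [orient_int]
  rw [area2_tri, hSo]
  by_cases h0 : orient_int p1 p2 p3 = 0
  · rw [if_pos (by rw [h0]; simp), if_pos h0]
    simp only [List.foldl_cons, List.foldl_nil]
    rw [union_seg_eq_segWalk, union_seg_eq_segWalk, union_seg_eq_segWalk]
  · rw [if_neg (by simpa using h0), if_neg h0]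
    rcases lt_or_gt_of_ne h0 with hneg | hpos
    · rw [if_pos hneg]
      have hS' : 0 < orient_int p1 p3 p2 := by
        have : orient_int p1 p3 p2 = -orient_int p1 p2 p3 := by simp only [orient_int]; ring
        omega
      have hxm : min p2.1 p3.1 = min p3.1 p2.1 := min_comm _ _
      have hxM : max p2.1 p3.1 = max p3.1 p2.1 := max_comm _ _
      have hym : min p2.2 p3.2 = min p3.2 p2.2 := min_comm _ _
      have hyM : max p2.2 p3.2 = max p3.2 p2.2 := max_comm _ _
      rw [hxm, hxM, hym, hyM]
      apply PySem.List.foldl_congr_mem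
      intro pts x _
      have hswap := PySem.List.foldl_congr_mem (PySem.List.pyRange (min p1.2 (min p3.2 p2.2)) (max p1.2 (max p3.2 p2.2) + 1))
        (fun pts y =>
          if (orient_int p1 p2 (x, y) ≥ 0 ∧ orient_int p2 p3 (x, y) ≥ 0 ∧ orient_int p3 p1 (x, y) ≥ 0) ∨
             (orient_int p1 p2 (x, y) ≤ 0 ∧ orient_int p2 p3 (x, y) ≤ 0 ∧ orient_int p3 p1 (x, y) ≤ 0)
          then PySem.Set.add pts (x, y) else pts)
        (fun pts y =>
          if (orient_int p1 p3 (x, y) ≥ 0 ∧ orient_int p3 p2 (x, y) ≥ 0 ∧ orient_int p2 p1 (x, y) ≥ 0) ∨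
             (orient_int p1 p3 (x, y) ≤ 0 ∧ orient_int p3 p2 (x, y) ≤ 0 ∧ orient_int p2 p1 (x, y) ≤ 0)
          then PySem.Set.add pts (x, y) else pts)
        pts
        (fun pts y _ => if_congr (pred_swap p1 p2 p3 x y) rfl rfl)
      exact hswap.trans (column_eq p1 p3 p2 hS' _ _ x pts)
    · rw [if_neg (by omega)]
      apply PySem.List.foldl_congr_mem
      intro pts x _
      exact column_eq p1 p2 p3 hpos _ _ x pts
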